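-- pv_equiv track=rewrite | github.com/latifnjimoluh/footy_tracker_backend | 04_monitor_favoris.py | organize_totals
-- ===== SOURCE A (Python) =====
-- def organize_totals(raw_list):
--     """Organise les totaux par seuil"""
--     mapped = {}
--     for item in raw_list:
--         threshold = item.get("P")
--         type_pari = item.get("Type")
--         cote = item.get("Cote")
--         if threshold is not None:
--             if threshold not in mapped:
--                 mapped[threshold] = {"Plus": "-", "Moins": "-"}
--             mapped[threshold][type_pari] = cote
--
--     sorted_result = []
--     for threshold in sorted(mapped.keys()):
--         sorted_result.append({
--             "Seuil": threshold,
--             "Plus": mapped[threshold]["Plus"],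
--             "Moins": mapped[threshold]["Moins"]
--         })
--     return sorted_result
-- ===== SOURCE B (Python) =====
-- def organize_totals(raw_list):
--     """Organise les totaux par seuil (tri d'abord, puis regroupement sequentiel)"""
--     items = sorted([it for it in raw_list if it.get("P") is not None],
--                    key=lambda it: it["P"])
--     result = []
--     i = 0
--     n = len(items)
--     while i < n:
--         seuil = items[i]["P"]
--         rec = {"Plus": "-", "Moins": "-"}
--         while i < n and items[i]["P"] == seuil:
--             rec[items[i].get("Type")] = items[i].get("Cote")
--             i += 1
--         result.append({"Seuil": seuil, "Plus": rec["Plus"], "Moins": rec["Moins"]})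
--     return result
-- ===== Notes on version B (the rewrite author's own statement) =====
-- stated objective: alternative
-- what changed: B replaces A's dict-of-dicts hash grouping followed by sorting the keys with: filter out items without a threshold, stably sort them by threshold, and emit the rows in one sequential grouping pass over the sorted list (stability preserves A's last-write-wins per threshold).
import Mathlib
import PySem

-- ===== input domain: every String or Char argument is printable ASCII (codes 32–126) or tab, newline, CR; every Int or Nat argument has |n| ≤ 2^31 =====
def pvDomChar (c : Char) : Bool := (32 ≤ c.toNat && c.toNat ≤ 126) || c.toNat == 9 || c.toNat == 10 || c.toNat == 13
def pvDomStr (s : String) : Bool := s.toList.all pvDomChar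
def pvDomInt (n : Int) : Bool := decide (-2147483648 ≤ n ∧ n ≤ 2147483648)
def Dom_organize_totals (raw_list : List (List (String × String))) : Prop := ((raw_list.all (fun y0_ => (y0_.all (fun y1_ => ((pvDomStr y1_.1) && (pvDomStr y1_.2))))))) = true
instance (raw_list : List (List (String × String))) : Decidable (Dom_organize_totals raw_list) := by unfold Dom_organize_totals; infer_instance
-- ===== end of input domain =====

-- B replaces A's hash-grouping-then-key-sort by filter + stable sort by threshold + one
-- sequential grouping pass (objective: alternative decomposition, same asymptotic cost).
-- Equivalence is about the RETURN value; neither version mutates its argument.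

-- item.get(k): first-match lookup in the association list (shared helper of both ports)
def pvLook (item : List (String × String)) (k : String) : Option String :=
  (item.find? (fun p => p.1 == k)).map (·.2)

-- {"Plus": "-", "Moins": "-"} — the record both Pythons start each threshold with.
-- Keys are Option String because `rec[item.get("Type")] = …` may use key None;
-- values are String: the `.getD "-"` below on a missing "Cote" is only exercised
-- outside Pre_ (Python stores None there, which is not a String).
def pvInit : PySem.Dict (Option String) String :=
  PySem.Dict.ofList [(some "Plus", "-"), (some "Moins", "-")]

-- ===== PORT A =====
def organize_totals (raw_list : List (List (String × String))) : List (List (String × String)) :=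
  let mapped := raw_list.foldl (fun m item =>
    match pvLook item "P" with
    | none => m
    | some threshold =>
        let m1 := if m.contains threshold then m else m.insert threshold pvInit
        m1.modify threshold pvInit
          (fun inner => inner.insert (pvLook item "Type") ((pvLook item "Cote").getD "-")))
    PySem.Dict.empty
  (PySem.List.sorted mapped.keys (fun x => x) false).map (fun threshold =>
    [("Seuil", threshold),
     ("Plus", (mapped.getD threshold pvInit).getD (some "Plus") "-"),
     ("Moins", (mapped.getD threshold pvInit).getD (some "Moins") "-")])

-- ===== PORT B =====
-- inner `while i < n and items[i]["P"] == seuil: rec[…] = …; i += 1` of Source B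
def pvGroup (t : String) :
    PySem.Dict (Option String) String → List (List (String × String)) →
    PySem.Dict (Option String) String × List (List (String × String))
  | rec, [] => (rec, [])
  | rec, it :: rest =>
      if pvLook it "P" == some t then
        pvGroup t (rec.insert (pvLook it "Type") ((pvLook it "Cote").getD "-")) rest
      else (rec, it :: rest)

-- termination measure for pvEmit: the inner while never grows the remaining list
theorem pvGroup_rest_le (t : String) (rec : PySem.Dict (Option String) String)
    (l : List (List (String × String))) : (pvGroup t rec l).2.length ≤ l.length := by
  induction l generalizing rec with
  | nil => simp [pvGroup]
  | cons it rest ih =>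
      by_cases h : pvLook it "P" == some t
      · simp only [pvGroup, h, if_pos]
        exact Nat.le_succ_of_le (ih _)
      · simp [pvGroup, h]

-- outer `while i < n` of Source B: take the current threshold, consume its group, emit a row
def pvEmit : List (List (String × String)) → List (List (String × String))
  | [] => []
  | it :: rest =>
      let t := (pvLook it "P").getD ""    -- items[i]["P"]; present on every filtered item
      let pr := pvGroup t
        (pvInit.insert (pvLook it "Type") ((pvLook it "Cote").getD "-")) rest
      [("Seuil", t), ("Plus", pr.1.getD (some "Plus") "-"),
       ("Moins", pr.1.getD (some "Moins") "-")] :: pvEmit pr.2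
termination_by l => l.length
decreasing_by exact Nat.lt_succ_of_le (pvGroup_rest_le _ _ _)

def organize_totals_alt (raw_list : List (List (String × String))) : List (List (String × String)) :=
  pvEmit (PySem.List.sorted
    (raw_list.filter (fun it => (pvLook it "P").isSome))
    (fun it => (pvLook it "P").getD "") false)   -- key=lambda it: it["P"]; default unused after the filter

-- ===== PRECONDITION & SPEC =====
-- Pre_ excludes (a) items whose association list repeats a key — such a value is not
-- representable as a Python dict, so A's behaviour on it is not defined by A — and
-- (b) items that make A place a None cote in the output row ("P" present, "Type" is
-- "Plus"/"Moins", "Cote" missing): there A returns None where the declared value type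
-- demands a string.
def Pre_organize_totals (raw_list : List (List (String × String))) : Prop :=
  ∀ it ∈ raw_list, (it.map Prod.fst).Nodup ∧
    ((pvLook it "P").isSome →
      (pvLook it "Type" = some "Plus" ∨ pvLook it "Type" = some "Moins") →
      (pvLook it "Cote").isSome)
instance (raw_list : List (List (String × String))) : Decidable (Pre_organize_totals raw_list) := by
  unfold Pre_organize_totals; infer_instance

def pvWitness_organize_totals : (List (List (String × String))) :=
  [[("P", "2"), ("Type", "Plus"), ("Cote", "1.85")],
   [("P", "1"), ("Type", "Moins"), ("Cote", "2.10")],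
   [("P", "1"), ("Type", "Plus"), ("Cote", "1.60")]]

def Spec_organize_totals (raw_list : List (List (String × String))) (out : List (List (String × String))) : Prop := out = organize_totals_alt raw_list
instance (raw_list : List (List (String × String))) (out : List (List (String × String))) : Decidable (Spec_organize_totals raw_list out) := by unfold Spec_organize_totals; infer_instance

-- ===== CLAIM (what is proved, stated in full; the proofs are below) =====
def Claim_equal_organize_totals : Prop := ∀ (raw_list : List (List (String × String))), Dom_organize_totals raw_list → Pre_organize_totals raw_list → Spec_organize_totals raw_list (organize_totals raw_list)

-- ===== LEMMAS AND PROOFS =====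

-- abbreviations for the proofs
def pvKey (it : List (String × String)) : String := (pvLook it "P").getD ""
def pvUpd (rec : PySem.Dict (Option String) String) (it : List (String × String)) :
    PySem.Dict (Option String) String :=
  rec.insert (pvLook it "Type") ((pvLook it "Cote").getD "-")
def pvRow (t : String) (rec : PySem.Dict (Option String) String) : List (String × String) :=
  [("Seuil", t), ("Plus", rec.getD (some "Plus") "-"), ("Moins", rec.getD (some "Moins") "-")]
def pvStepA (m : PySem.Dict String (PySem.Dict (Option String) String))
    (item : List (String × String)) : PySem.Dict String (PySem.Dict (Option String) String) :=
  match pvLook item "P" with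
  | none => m
  | some threshold =>
      let m1 := if m.contains threshold then m else m.insert threshold pvInit
      m1.modify threshold pvInit
        (fun inner => inner.insert (pvLook item "Type") ((pvLook item "Cote").getD "-"))

theorem organize_totals_eq (raw_list : List (List (String × String))) :
    organize_totals raw_list =
      (PySem.List.sorted (raw_list.foldl pvStepA PySem.Dict.empty).keys (fun x => x) false).map
        (fun t => pvRow t ((raw_list.foldl pvStepA PySem.Dict.empty).getD t pvInit)) := rfl

-- what one A-loop step stores under key t
theorem getD_foldA (l : List (List (String × String)))
    (d : PySem.Dict String (PySem.Dict (Option String) String)) (t : String) :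
    (l.foldl pvStepA d).getD t pvInit =
      (l.filter (fun it => pvLook it "P" == some t)).foldl pvUpd (d.getD t pvInit) := by
  induction l generalizing d with
  | nil => simp
  | cons it l ih =>
      have hstep : (pvStepA d it).getD t pvInit =
          if pvLook it "P" == some t then pvUpd (d.getD t pvInit) it else d.getD t pvInit := by
        cases hP : pvLook it "P" with
        | none => simp [pvStepA, hP]
        | some s =>
            have hm1s : (if d.contains s then d else d.insert s pvInit).getD s pvInit
                = d.getD s pvInit := by
              cases hc : d.contains s with
              | true => simp
              | false =>
                  simp only [Bool.false_eq_true, if_false]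
                  rw [PySem.Dict.getD_insert_self, PySem.Dict.getD_of_not_contains d pvInit hc]
            simp only [pvStepA, hP, PySem.Dict.modify, PySem.Dict.getD_insert]
            by_cases hts : t = s
            · subst hts
              simp [hm1s, pvUpd]
            · have hb : (some s == some t) = false := by
                simp [beq_iff_eq]
                exact fun h => hts h.symm
              simp only [hb, Bool.false_eq_true, if_false, if_neg hts]
              cases hc : d.contains s with
              | true => simp
              | false =>
                  simp only [Bool.false_eq_true, if_false]
                  rw [PySem.Dict.getD_insert_of_ne _ _ _ hts]
      rw [List.foldl_cons, List.filter_cons, ih (pvStepA d it), hstep]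
      by_cases hP : (pvLook it "P" == some t) = true
      · simp [hP]
      · simp [hP]

theorem mem_keys_foldA (l : List (List (String × String)))
    (d : PySem.Dict String (PySem.Dict (Option String) String)) (t : String) :
    (t ∈ (l.foldl pvStepA d).keys ↔ t ∈ d.keys ∨ some t ∈ l.map (fun it => pvLook it "P")) := by
  induction l generalizing d with
  | nil => simp
  | cons it l ih =>
      have hstep : ∀ x : String, x ∈ (pvStepA d it).keys ↔ x ∈ d.keys ∨ pvLook it "P" = some x := by
        intro x
        cases hP : pvLook it "P" with
        | none => simp [pvStepA, hP]
        | some s =>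
            simp only [pvStepA, hP, PySem.Dict.modify, Option.some.injEq]
            cases hc : d.contains s with
            | true =>
                simp only [if_true]
                rw [PySem.Dict.mem_keys_insert]
                constructor
                · rintro (rfl | hx)
                  · exact Or.inl ((PySem.Dict.contains_iff_mem_keys d x).mp hc)
                  · exact Or.inl hx
                · rintro (hx | rfl)
                  · exact Or.inr hx
                  · exact Or.inl rfl
            | false =>
                simp only [Bool.false_eq_true, if_false]
                rw [PySem.Dict.mem_keys_insert, PySem.Dict.mem_keys_insert]
                tauto
      rw [List.foldl_cons, ih (pvStepA d it), hstep t, List.map_cons, List.mem_cons]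
      constructor
      · rintro ((hd | hs) | hl)
        · exact Or.inl hd
        · exact Or.inr (Or.inl hs.symm)
        · exact Or.inr (Or.inr hl)
      · rintro (hd | hs | hl)
        · exact Or.inl (Or.inl hd)
        · exact Or.inl (Or.inr hs.symm)
        · exact Or.inr hl

theorem nodup_keys_foldA (l : List (List (String × String)))
    (d : PySem.Dict String (PySem.Dict (Option String) String)) (h : d.keys.Nodup) :
    (l.foldl pvStepA d).keys.Nodup := by
  induction l generalizing d with
  | nil => simpa using h
  | cons it l ih =>
      apply ih
      cases hP : pvLook it "P" with
      | none => simpa [pvStepA, hP] using h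
      | some s =>
          simp only [pvStepA, hP, PySem.Dict.modify]
          cases hc : d.contains s with
          | true =>
              simp only [if_true]
              rwa [PySem.Dict.keys_insert_of_contains _ _ hc]
          | false =>
              simp only [Bool.false_eq_true, if_false]
              rw [PySem.Dict.keys_insert_of_contains _ _ (PySem.Dict.contains_insert_self _ _ _),
                PySem.Dict.keys_insert_of_not_contains _ _ hc]
              refine List.Nodup.append h (List.nodup_singleton s) ?_
              intro x hx hxs
              rw [List.mem_singleton] at hxs
              subst hxs
              exact (Bool.not_eq_true _).mpr hc ((PySem.Dict.contains_iff_mem_keys d x).mpr hx)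

-- stability of Python's sort: inserting x keeps it after all equal keys
theorem pairwise_insertBy {α : Type} (key : α → String) (x : α) (acc : List α)
    (h : acc.Pairwise (fun a b => key a ≤ key b)) :
    (PySem.List.insertBy (fun a b => decide (key a < key b)) x acc).Pairwise
      (fun a b => key a ≤ key b) := by
  induction acc with
  | nil => simp [PySem.List.insertBy]
  | cons y ys ih =>
      rw [List.pairwise_cons] at h
      by_cases hlt : key x < key y
      · simp only [PySem.List.insertBy, hlt, decide_true, if_true]
        refine List.Pairwise.cons ?_ (List.Pairwise.cons h.1 h.2)
        intro z hz
        rcases List.mem_cons.mp hz with rfl | hz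
        · exact le_of_lt hlt
        · exact le_trans (le_of_lt hlt) (h.1 z hz)
      · simp only [PySem.List.insertBy, hlt, decide_false, Bool.false_eq_true, if_false]
        refine List.Pairwise.cons ?_ (ih h.2)
        intro z hz
        rcases (PySem.List.mem_insertBy _ _ _ _).mp hz with rfl | hz
        · exact le_of_not_gt hlt
        · exact h.1 z hz

theorem filter_insertBy {α : Type} (key : α → String) (t : String) (x : α) (acc : List α)
    (h : acc.Pairwise (fun a b => key a ≤ key b)) :
    (PySem.List.insertBy (fun a b => decide (key a < key b)) x acc).filter (fun a => key a == t)
      = acc.filter (fun a => key a == t) ++ (if key x == t then [x] else []) := by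
  induction acc with
  | nil => by_cases hx : (key x == t) = true <;> simp [PySem.List.insertBy, hx]
  | cons y ys ih =>
      rw [List.pairwise_cons] at h
      by_cases hlt : key x < key y
      · simp only [PySem.List.insertBy, hlt, decide_true, if_true]
        by_cases hx : (key x == t) = true
        · have ht : key x = t := by simpa [beq_iff_eq] using hx
          have hnil : (y :: ys).filter (fun a => key a == t) = [] := by
            rw [List.filter_eq_nil_iff]
            intro z hz
            have hyz : key y ≤ key z := by
              rcases List.mem_cons.mp hz with rfl | hz
              · exact le_refl _
              · exact h.1 z hz
            have : t < key z := lt_of_lt_of_le (ht ▸ hlt) hyz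
            simp [beq_iff_eq]
            exact fun hzt => absurd hzt (ne_of_gt this)
          rw [List.filter_cons, hnil]
          simp [hx]
        · have hx' : (key x == t) = false := by simpa using hx
          simp [List.filter_cons, hx']
      · simp only [PySem.List.insertBy, hlt, decide_false, Bool.false_eq_true, if_false]
        rw [List.filter_cons, List.filter_cons, ih h.2]
        by_cases hy : (key y == t) = true <;> simp [hy]

theorem filter_sorted {α : Type} (key : α → String) (t : String) (xs : List α) :
    (PySem.List.sorted xs key false).filter (fun a => key a == t)
      = xs.filter (fun a => key a == t) := by
  rw [PySem.List.sorted_eq_foldl_insertBy]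
  suffices h : ∀ (l acc : List α), acc.Pairwise (fun a b => key a ≤ key b) →
      (l.foldl (fun acc x => PySem.List.insertBy (fun a b => decide (key a < key b)) x acc)
        acc).filter (fun a => key a == t)
        = acc.filter (fun a => key a == t) ++ l.filter (fun a => key a == t) by
    simpa using h xs [] (by simp)
  intro l
  induction l with
  | nil => intro acc _; simp
  | cons x l ih =>
      intro acc hacc
      rw [List.foldl_cons, ih _ (pairwise_insertBy key x acc hacc),
        filter_insertBy key t x acc hacc, List.filter_cons, List.append_assoc]
      by_cases hx : (key x == t) = true <;> simp [hx]

-- the distinct thresholds of a sorted list, in order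
def pvDthr : List (List (String × String)) → List String
  | [] => []
  | it :: rest =>
      (pvLook it "P").getD "" ::
        pvDthr (rest.dropWhile (fun j => pvLook j "P" == pvLook it "P"))
termination_by l => l.length
decreasing_by exact Nat.lt_succ_of_le (List.length_dropWhile_le _ _)

theorem mem_pvDthr (S : List (List (String × String))) :
    ∀ (t : String), (∀ it ∈ S, (pvLook it "P").isSome) →
      (t ∈ pvDthr S ↔ some t ∈ S.map (fun it => pvLook it "P")) := by
  induction S using pvDthr.induct with
  | case1 => intro t _; simp [pvDthr]
  | case2 it rest ih =>
      intro t h1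
      obtain ⟨s, hs⟩ := Option.isSome_iff_exists.mp (h1 it (by simp))
      have h1r : ∀ z ∈ rest.dropWhile (fun j => pvLook j "P" == pvLook it "P"),
          (pvLook z "P").isSome :=
        fun z hz => h1 z (List.mem_cons_of_mem _ ((List.dropWhile_sublist _).subset hz))
      rw [pvDthr]
      rw [List.mem_cons, List.map_cons, List.mem_cons]
      constructor
      · rintro (rfl | hmem)
        · left; simp [hs]
        · right
          rcases List.mem_map.mp ((ih t h1r).mp hmem) with ⟨z, hz, hzt⟩
          exact List.mem_map.mpr ⟨z, (List.dropWhile_sublist _).subset hz, hzt⟩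
      · rintro (heq | hmem)
        · left
          rw [hs] at heq
          rw [hs]
          simpa using Option.some.inj heq
        · rw [← List.takeWhile_append_dropWhile
              (p := fun j => pvLook j "P" == pvLook it "P") (l := rest),
            List.map_append] at hmem
          rcases List.mem_append.mp hmem with htk | hdr
          · left
            rcases List.mem_map.mp htk with ⟨z, hz, hzt⟩
            have hzP : pvLook z "P" = pvLook it "P" := by
              simpa using List.mem_takeWhile_imp hz
            rw [hzP, hs] at hzt
            rw [hs]
            simpa using (Option.some.inj hzt).symm
          · right; exact (ih t h1r).mpr hdr

theorem drop_gt (s : String) :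
    ∀ (l : List (List (String × String))),
      (∀ z ∈ l, (pvLook z "P").isSome) →
      l.Pairwise (fun a b => pvKey a ≤ pvKey b) →
      (∀ z ∈ l, s ≤ pvKey z) →
      ∀ z ∈ l.dropWhile (fun j => pvLook j "P" == some s), s < pvKey z := by
  intro l
  induction l with
  | nil => intro _ _ _ z hz; simp at hz
  | cons h tl ih =>
      intro h1 h2 hge z hz
      rw [List.pairwise_cons] at h2
      by_cases hp : (pvLook h "P" == some s) = true
      · rw [List.dropWhile_cons_of_pos (p := fun j => pvLook j "P" == some s) hp] at hz
        exact ih (fun z hz => h1 z (List.mem_cons_of_mem _ hz)) h2.2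
          (fun z hz => hge z (List.mem_cons_of_mem _ hz)) z hz
      · rw [List.dropWhile_cons_of_neg (p := fun j => pvLook j "P" == some s) hp] at hz
        obtain ⟨u, hu⟩ := Option.isSome_iff_exists.mp (h1 h (by simp))
        have hku : pvKey h = u := by simp [pvKey, hu]
        have hne : pvKey h ≠ s := by
          intro he
          have hus : u = s := hku.symm.trans he
          exact hp (by rw [hu, hus]; simp)
        have hsh : s < pvKey h := lt_of_le_of_ne (hge h (by simp)) (Ne.symm hne)
        rcases List.mem_cons.mp hz with rfl | hz'
        · exact hsh
        · exact lt_of_lt_of_le hsh (h2.1 z hz')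

theorem pairwise_lt_pvDthr (S : List (List (String × String))) :
    (∀ it ∈ S, (pvLook it "P").isSome) →
    S.Pairwise (fun a b => pvKey a ≤ pvKey b) →
    (pvDthr S).Pairwise (· < ·) := by
  induction S using pvDthr.induct with
  | case1 => intro _ _; simp [pvDthr]
  | case2 it rest ih =>
      intro h1 h2
      obtain ⟨s, hs⟩ := Option.isSome_iff_exists.mp (h1 it (by simp))
      rw [List.pairwise_cons] at h2
      have hkit : pvKey it = s := by simp [pvKey, hs]
      have h1rest : ∀ z ∈ rest, (pvLook z "P").isSome :=
        fun z hz => h1 z (List.mem_cons_of_mem _ hz)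
      have hge : ∀ z ∈ rest, s ≤ pvKey z := fun z hz => hkit ▸ h2.1 z hz
      have hgt := drop_gt s rest h1rest h2.2 hge
      have h1r : ∀ z ∈ rest.dropWhile (fun j => pvLook j "P" == pvLook it "P"),
          (pvLook z "P").isSome :=
        fun z hz => h1rest z ((List.dropWhile_sublist _).subset hz)
      have h2r : (rest.dropWhile (fun j => pvLook j "P" == pvLook it "P")).Pairwise
          (fun a b => pvKey a ≤ pvKey b) := h2.2.sublist (List.dropWhile_sublist _)
      rw [pvDthr]
      refine List.Pairwise.cons ?_ (ih h1r h2r)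
      intro y hy
      rcases List.mem_map.mp ((mem_pvDthr _ y h1r).mp hy) with ⟨z, hz, hzt⟩
      have hky : pvKey z = y := by simp [pvKey, hzt]
      have hz' : z ∈ rest.dropWhile (fun j => pvLook j "P" == some s) := by
        rw [← hs]; exact hz
      have := hgt z hz'
      rw [hs]
      simpa [hky] using this

theorem pvGroup_spec (t : String) (rec : PySem.Dict (Option String) String)
    (l : List (List (String × String))) :
    pvGroup t rec l =
      ((l.takeWhile (fun j => pvLook j "P" == some t)).foldl pvUpd rec,
       l.dropWhile (fun j => pvLook j "P" == some t)) := by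
  induction l generalizing rec with
  | nil => simp [pvGroup]
  | cons it l ih =>
      by_cases hp : (pvLook it "P" == some t) = true
      · rw [List.takeWhile_cons_of_pos (p := fun j => pvLook j "P" == some t) hp,
          List.dropWhile_cons_of_pos (p := fun j => pvLook j "P" == some t) hp]
        simp only [pvGroup, hp, if_true, List.foldl_cons]
        exact ih _
      · rw [List.takeWhile_cons_of_neg (p := fun j => pvLook j "P" == some t) hp,
          List.dropWhile_cons_of_neg (p := fun j => pvLook j "P" == some t) hp]
        simp [pvGroup, hp]

theorem emit_eq_aux (n : Nat) :
    ∀ (S : List (List (String × String))), S.length ≤ n →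
      (∀ it ∈ S, (pvLook it "P").isSome) →
      S.Pairwise (fun a b => pvKey a ≤ pvKey b) →
      pvEmit S = (pvDthr S).map
        (fun t => pvRow t ((S.filter (fun it => pvKey it == t)).foldl pvUpd pvInit)) := by
  induction n with
  | zero =>
      intro S hlen _ _
      cases S with
      | nil => simp [pvEmit, pvDthr]
      | cons a l => simp at hlen
  | succ n ihn =>
      intro S hlen h1 h2
      cases S with
      | nil => simp [pvEmit, pvDthr]
      | cons it rest =>
          obtain ⟨s, hs⟩ := Option.isSome_iff_exists.mp (h1 it (by simp))
          have hkit : pvKey it = s := by simp [pvKey, hs]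
          rw [List.pairwise_cons] at h2
          have hge : ∀ z ∈ rest, s ≤ pvKey z := fun z hz => hkit ▸ h2.1 z hz
          have h1rest : ∀ z ∈ rest, (pvLook z "P").isSome :=
            fun z hz => h1 z (List.mem_cons_of_mem _ hz)
          have hgt : ∀ z ∈ rest.dropWhile (fun j => pvLook j "P" == some s), s < pvKey z :=
            drop_gt s rest h1rest h2.2 hge
          have h1r : ∀ z ∈ rest.dropWhile (fun j => pvLook j "P" == some s),
              (pvLook z "P").isSome :=
            fun z hz => h1rest z ((List.dropWhile_sublist _).subset hz)
          have h2r : (rest.dropWhile (fun j => pvLook j "P" == some s)).Pairwise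
              (fun a b => pvKey a ≤ pvKey b) := h2.2.sublist (List.dropWhile_sublist _)
          have hlenr : (rest.dropWhile (fun j => pvLook j "P" == some s)).length ≤ n :=
            le_trans (List.length_dropWhile_le _ _) (Nat.le_of_succ_le_succ hlen)
          have htg : ∀ j ∈ rest.takeWhile (fun j => pvLook j "P" == some s),
              pvLook j "P" = some s :=
            fun j hj => by simpa using List.mem_takeWhile_imp hj
          have hfilters : (it :: rest).filter (fun x => pvKey x == s)
              = it :: rest.takeWhile (fun j => pvLook j "P" == some s) := by
            rw [List.filter_cons]
            have hc : (pvKey it == s) = true := by simp [hkit]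
            rw [if_pos hc]
            congr 1
            conv_lhs => rw [← List.takeWhile_append_dropWhile
              (p := fun j => pvLook j "P" == some s) (l := rest)]
            rw [List.filter_append]
            have hA : (rest.takeWhile (fun j => pvLook j "P" == some s)).filter
                (fun x => pvKey x == s) = rest.takeWhile (fun j => pvLook j "P" == some s) :=
              List.filter_eq_self.mpr (fun a ha => by simp [pvKey, htg a ha])
            have hB : (rest.dropWhile (fun j => pvLook j "P" == some s)).filter
                (fun x => pvKey x == s) = [] :=
              List.filter_eq_nil_iff.mpr (fun a ha => by
                have := ne_of_gt (hgt a ha)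
                simpa using this)
            rw [hA, hB, List.append_nil]
          simp only [pvEmit]
          rw [hs]
          simp only [Option.getD_some]
          rw [pvGroup_spec, pvDthr, hs]
          simp only [Option.getD_some, List.map_cons]
          congr 1
          · rw [hfilters, List.foldl_cons]
            rfl
          · rw [ihn _ hlenr h1r h2r]
            apply List.map_congr_left
            intro t ht
            have hts : s < t := by
              rcases List.mem_map.mp ((mem_pvDthr _ t h1r).mp ht) with ⟨z, hz, hzt⟩
              have hky : pvKey z = t := by simp [pvKey, hzt]
              exact hky ▸ hgt z hz
            have hfil : (it :: rest).filter (fun x => pvKey x == t)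
                = (rest.dropWhile (fun j => pvLook j "P" == some s)).filter
                    (fun x => pvKey x == t) := by
              rw [List.filter_cons]
              have hitf : (pvKey it == t) = false := by
                simpa [hkit] using (ne_of_lt hts)
              rw [if_neg (by simp [hitf])]
              conv_lhs => rw [← List.takeWhile_append_dropWhile
                (p := fun j => pvLook j "P" == some s) (l := rest)]
              rw [List.filter_append]
              have hA : (rest.takeWhile (fun j => pvLook j "P" == some s)).filter
                  (fun x => pvKey x == t) = [] :=
                List.filter_eq_nil_iff.mpr (fun a ha => by
                  have hka : pvKey a = s := by simp [pvKey, htg a ha]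
                  simpa [hka] using (ne_of_lt hts))
              rw [hA, List.nil_append]
            rw [hfil]

theorem emit_eq (S : List (List (String × String)))
    (h1 : ∀ it ∈ S, (pvLook it "P").isSome)
    (h2 : S.Pairwise (fun a b => pvKey a ≤ pvKey b)) :
    pvEmit S = (pvDthr S).map
      (fun t => pvRow t ((S.filter (fun it => pvKey it == t)).foldl pvUpd pvInit)) :=
  emit_eq_aux S.length S (le_refl _) h1 h2

-- ===== VERDICT (by name: the statement is the Claim_ definition above) =====
theorem organize_totals_spec : Claim_equal_organize_totals := by
  intro raw _hdom _hpre
  unfold Spec_organize_totals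
  have h1S : ∀ it ∈ PySem.List.sorted (raw.filter (fun it => (pvLook it "P").isSome)) pvKey false,
      (pvLook it "P").isSome := by
    intro it hit
    exact (List.mem_filter.mp ((PySem.List.mem_sorted _ _ _ _).mp hit)).2
  have h2S := PySem.List.sorted_pairwise (raw.filter (fun it => (pvLook it "P").isSome)) pvKey
  have halt : organize_totals_alt raw
      = pvEmit (PySem.List.sorted (raw.filter (fun it => (pvLook it "P").isSome)) pvKey false) := rfl
  rw [organize_totals_eq, halt, emit_eq _ h1S h2S]
  have hpairlt := pairwise_lt_pvDthr _ h1S h2S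
  have hdnodup : (pvDthr (PySem.List.sorted (raw.filter (fun it => (pvLook it "P").isSome))
      pvKey false)).Nodup := hpairlt.imp (fun h => ne_of_lt h)
  have hknodup := nodup_keys_foldA raw PySem.Dict.empty PySem.Dict.nodup_keys_empty
  have hmemiff : ∀ t : String,
      t ∈ pvDthr (PySem.List.sorted (raw.filter (fun it => (pvLook it "P").isSome)) pvKey false)
        ↔ t ∈ (raw.foldl pvStepA PySem.Dict.empty).keys := by
    intro t
    rw [mem_pvDthr _ t h1S, mem_keys_foldA raw PySem.Dict.empty t, PySem.Dict.keys_empty]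
    simp only [List.not_mem_nil, false_or]
    constructor
    · intro h
      rcases List.mem_map.mp h with ⟨z, hz, hzt⟩
      exact List.mem_map.mpr
        ⟨z, (List.mem_filter.mp ((PySem.List.mem_sorted _ _ _ _).mp hz)).1, hzt⟩
    · intro h
      rcases List.mem_map.mp h with ⟨z, hz, hzt⟩
      have hzF : z ∈ raw.filter (fun it => (pvLook it "P").isSome) :=
        List.mem_filter.mpr ⟨hz, by simp [hzt]⟩
      exact List.mem_map.mpr ⟨z, (PySem.List.mem_sorted _ _ _ _).mpr hzF, hzt⟩
  have hperm := (List.perm_ext_iff_of_nodup hdnodup hknodup).mpr hmemiff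
  rw [PySem.List.sorted_eq_of_perm_of_pairwise_lt _ _ _ hperm hpairlt]
  apply List.map_congr_left
  intro t _
  have hff : raw.filter (fun it => pvLook it "P" == some t)
      = (raw.filter (fun it => (pvLook it "P").isSome)).filter (fun it => pvKey it == t) := by
    rw [List.filter_filter]
    apply List.filter_congr
    intro it _
    cases h : pvLook it "P" with
    | none => simp [pvKey, h]
    | some u => simp [pvKey, h]
  rw [getD_foldA raw PySem.Dict.empty t, PySem.Dict.getD_empty, hff,
    ← filter_sorted pvKey t (raw.filter (fun it => (pvLook it "P").isSome))]
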